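-- pv_equiv track=rewrite | github.com/the-lost-mahiro/My-LeetCode-Portfolio | practice/1413-maximum-side-length-of-a-square-with-sum-less-than-or-equal-to-threshold/solution.py | maxSideLength
-- ===== SOURCE A (Python) =====
-- from typing import List
--
-- def maxSideLength(mat: List[List[int]], threshold: int) -> int:
--     m, n = len(mat), len(mat[0])
--
--     P = [[0] * (n + 1) for _ in range(m + 1)]
--     for r in range(1, m + 1):
--         for c in range(1, n + 1):
--             P[r][c] = mat[r-1][c-1] + P[r-1][c] + P[r][c-1] - P[r-1][c-1]
--
--     def get_sum(r1, c1, r2, c2):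
--         return P[r2+1][c2+1] - P[r1][c2+1] - P[r2+1][c1] + P[r1][c1]
--
--     def check(k):
--         for r in range(m - k + 1):
--             for c in range(n - k + 1):
--                 if get_sum(r, c, r + k - 1, c + k - 1) <= threshold:
--                     return True
--         return False
--
--     low, high = 1, min(m, n)
--     ans = 0
--     while low <= high:
--         mid = (low + high) // 2
--         if check(mid):
--             ans = mid
--             low = mid + 1
--         else:
--             high = mid - 1
--     return ans
-- ===== SOURCE B (Python) =====
-- from typing import List
--
-- def maxSideLength(mat: List[List[int]], threshold: int) -> int:
--     m, n = len(mat), len(mat[0])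
--
--     def square_sum(r, c, k):
--         total = 0
--         for i in range(k):
--             for j in range(k):
--                 total += mat[r + i][c + j]
--         return total
--
--     def ok(k):
--         for r in range(m - k + 1):
--             for c in range(n - k + 1):
--                 if square_sum(r, c, k) <= threshold:
--                     return True
--         return False
--
--     lo, hi, ans = 1, min(m, n), 0
--     while lo <= hi:
--         mid = (lo + hi) // 2
--         if ok(mid):
--             ans = mid
--             lo = mid + 1
--         else:
--             hi = mid - 1
--     return ans
-- ===== Notes on version B (the rewrite author's own statement) =====
-- stated objective: simpler
-- what changed: B removes the 2-D prefix-sum table entirely and computes each candidate square's sum by direct summation inside the same binary search over the side length.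
import Mathlib
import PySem

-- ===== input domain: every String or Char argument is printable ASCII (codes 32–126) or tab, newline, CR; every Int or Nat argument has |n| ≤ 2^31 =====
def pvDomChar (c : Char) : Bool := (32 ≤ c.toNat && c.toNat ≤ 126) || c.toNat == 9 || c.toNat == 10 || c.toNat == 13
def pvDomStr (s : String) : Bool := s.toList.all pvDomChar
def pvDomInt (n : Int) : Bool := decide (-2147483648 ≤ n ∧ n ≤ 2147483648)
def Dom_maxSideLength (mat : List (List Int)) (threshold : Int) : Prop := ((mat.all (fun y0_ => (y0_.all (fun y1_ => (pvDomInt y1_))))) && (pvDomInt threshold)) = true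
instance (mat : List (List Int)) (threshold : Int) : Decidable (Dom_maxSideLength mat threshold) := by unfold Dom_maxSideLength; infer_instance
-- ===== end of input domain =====

-- B drops A's 2-D prefix-sum table and sums each candidate square directly inside the
-- same binary search over the side length: simpler, not faster.

-- ===== PORT A =====
-- P[r][c] = mat[r-1][c-1] + P[r-1][c] + P[r][c-1] - P[r-1][c-1]; Python fills a
-- preallocated table in place, here each row is built left-to-right from the previous
-- row, producing the same entries in the same order.
def pvBuildRowA (prev matRow : List Int) (n : Nat) : List Int :=
  (List.range n).foldl
    (fun row c => row ++ [matRow.getD c 0 + prev.getD (c+1) 0 + row.getD c 0 - prev.getD c 0])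
    [0]

def pvBuildPA (mat : List (List Int)) (m n : Nat) : List (List Int) :=
  (List.range m).foldl
    (fun P r => P ++ [pvBuildRowA (P.getD r []) (mat.getD r []) n])
    [List.replicate (n+1) 0]

-- get_sum(r1, c1, r2, c2)
def pvGetSumA (P : List (List Int)) (r1 c1 r2 c2 : Nat) : Int :=
  (P.getD (r2+1) []).getD (c2+1) 0 - (P.getD r1 []).getD (c2+1) 0
    - (P.getD (r2+1) []).getD c1 0 + (P.getD r1 []).getD c1 0

-- check(k): the early-return-True double loop is `any` over both ranges
def pvCheckA (P : List (List Int)) (threshold : Int) (m n k : Nat) : Bool :=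
  (List.range (m + 1 - k)).any fun r =>
    (List.range (n + 1 - k)).any fun c =>
      pvGetSumA P r c (r + k - 1) (c + k - 1) ≤ threshold

-- while low <= high: mid = (low+high)//2; … . The `mid = 0` guard only totalizes the
-- Nat subtraction `mid - 1`: there Python's loop also ends at once (high becomes -1)
-- and returns ans, so the guard returns exactly what Python returns.
def pvBsearchA (check : Nat → Bool) (low high ans : Nat) : Nat :=
  if h : low ≤ high then
    let mid := (low + high) / 2
    if check mid then pvBsearchA check (mid + 1) high mid
    else if hm : mid = 0 then ans else pvBsearchA check low (mid - 1) ans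
  else ans
termination_by high + 1 - low
decreasing_by all_goals omega

def maxSideLength (mat : List (List Int)) (threshold : Int) : Int :=
  let m := mat.length
  let n := (mat.headD []).length
  let P := pvBuildPA mat m n
  (pvBsearchA (fun k => pvCheckA P threshold m n k) 1 (min m n) 0 : Nat)

-- ===== PORT B =====
-- square_sum(r, c, k): direct double loop accumulating the matrix entries
def pvSquareSumB (mat : List (List Int)) (r c k : Nat) : Int :=
  (List.range k).foldl
    (fun t i => (List.range k).foldl (fun t j => t + (mat.getD (r+i) []).getD (c+j) 0) t)
    0

-- ok(k)
def pvOkB (mat : List (List Int)) (threshold : Int) (m n k : Nat) : Bool :=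
  (List.range (m + 1 - k)).any fun r =>
    (List.range (n + 1 - k)).any fun c =>
      pvSquareSumB mat r c k ≤ threshold

-- while lo <= hi (same totalizing `mid = 0` guard as in port A, see there)
def pvBsearchB (ok : Nat → Bool) (lo hi ans : Nat) : Nat :=
  if h : lo ≤ hi then
    let mid := (lo + hi) / 2
    if ok mid then pvBsearchB ok (mid + 1) hi mid
    else if hm : mid = 0 then ans else pvBsearchB ok lo (mid - 1) ans
  else ans
termination_by hi + 1 - lo
decreasing_by all_goals omega

def maxSideLength_alt (mat : List (List Int)) (threshold : Int) : Int :=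
  let m := mat.length
  let n := (mat.headD []).length
  (pvBsearchB (fun k => pvOkB mat threshold m n k) 1 (min m n) 0 : Nat)

-- ===== PRECONDITION & SPEC =====
-- Pre_ excludes exactly the inputs on which Python A raises an IndexError: an empty
-- matrix (mat[0]) and a ragged matrix with some row shorter than row 0 (mat[r-1][c-1]
-- while the prefix table is built).
def Pre_maxSideLength (mat : List (List Int)) (threshold : Int) : Prop :=
  mat ≠ [] ∧ ∀ row ∈ mat, (mat.headD []).length ≤ row.length
instance (mat : List (List Int)) (threshold : Int) : Decidable (Pre_maxSideLength mat threshold) := by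
  unfold Pre_maxSideLength; infer_instance

def pvWitness_maxSideLength : List (List Int) × Int := ([[1, 2], [3, 4]], 3)

def Spec_maxSideLength (mat : List (List Int)) (threshold : Int) (out : Int) : Prop := out = maxSideLength_alt mat threshold
instance (mat : List (List Int)) (threshold : Int) (out : Int) : Decidable (Spec_maxSideLength mat threshold out) := by unfold Spec_maxSideLength; infer_instance

-- ===== CLAIM (what is proved, stated in full; the proofs are below) =====
def Claim_equal_maxSideLength : Prop := ∀ (mat : List (List Int)) (threshold : Int), Dom_maxSideLength mat threshold → Pre_maxSideLength mat threshold → Spec_maxSideLength mat threshold (maxSideLength mat threshold)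

-- ===== LEMMAS AND PROOFS =====

-- the entry mat[i][j] as both ports read it (default 0; in bounds everywhere it is used)
def pvEnt (mat : List (List Int)) (i j : Nat) : Int := (mat.getD i []).getD j 0

-- the 2-D prefix sum A's table holds: sum of mat[i][j] over i < r, j < c
def pvPref (mat : List (List Int)) (r c : Nat) : Int :=
  ∑ i ∈ Finset.range r, ∑ j ∈ Finset.range c, pvEnt mat i j

lemma pvPref_zero_left (mat : List (List Int)) (c : Nat) : pvPref mat 0 c = 0 := by
  simp [pvPref]

lemma pvPref_zero_right (mat : List (List Int)) (r : Nat) : pvPref mat r 0 = 0 := by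
  simp [pvPref]

lemma pvPref_rec (mat : List (List Int)) (r c : Nat) :
    pvPref mat (r+1) (c+1)
      = pvEnt mat r c + pvPref mat r (c+1) + pvPref mat (r+1) c - pvPref mat r c := by
  simp [pvPref, Finset.sum_range_succ]
  ring

lemma pvGetD_map_range (f : Nat → Int) (n c : Nat) (h : c < n) :
    ((List.range n).map f).getD c 0 = f c := by
  rw [List.getD_eq_getElem?_getD]
  simp [h]

lemma pvBuildRowA_eq (mat : List (List Int)) (r n : Nat) (prev : List Int)
    (hprev : ∀ c, c ≤ n → prev.getD c 0 = pvPref mat r c) :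
    pvBuildRowA prev (mat.getD r []) n = (List.range (n+1)).map (pvPref mat (r+1)) := by
  unfold pvBuildRowA
  suffices h : ∀ c, c ≤ n →
      (List.range c).foldl
        (fun row c' => row ++ [(mat.getD r []).getD c' 0 + prev.getD (c'+1) 0
          + row.getD c' 0 - prev.getD c' 0]) [0]
      = (List.range (c+1)).map (pvPref mat (r+1)) by
    exact h n le_rfl
  intro c hc
  induction c with
  | zero => simp [pvPref_zero_right]
  | succ c ih =>
    rw [show List.range (c+1) = List.range c ++ [c] from List.range_succ]
    rw [List.foldl_append, ih (by omega), List.foldl_cons, List.foldl_nil]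
    rw [hprev (c+1) (by omega), hprev c (by omega)]
    rw [pvGetD_map_range _ _ _ (by omega)]
    rw [show List.range (c+1+1) = List.range (c+1) ++ [c+1] from List.range_succ]
    rw [List.map_append]
    congr 1
    simp only [List.map_cons, List.map_nil, List.cons.injEq, and_true]
    rw [pvPref_rec]
    simp [pvEnt]

lemma pvBuildPA_eq (mat : List (List Int)) (m n : Nat) :
    pvBuildPA mat m n
      = (List.range (m+1)).map (fun r => (List.range (n+1)).map (pvPref mat r)) := by
  induction m with
  | zero =>
    unfold pvBuildPA
    simp only [List.range_zero, List.foldl_nil]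
    congr 1
    apply List.ext_getElem
    · simp
    · intro i h1 h2
      simp [pvPref_zero_left]
  | succ m ih =>
    unfold pvBuildPA at ih ⊢
    rw [show List.range (m+1) = List.range m ++ [m] from List.range_succ]
    rw [List.foldl_append, ih, List.foldl_cons, List.foldl_nil]
    have hget : (((List.range (m+1)).map (fun r => (List.range (n+1)).map (pvPref mat r))).getD m [])
        = (List.range (n+1)).map (pvPref mat m) := by
      rw [List.getD_eq_getElem?_getD]
      simp [Nat.lt_succ_self m]
    rw [hget, pvBuildRowA_eq mat m n _ (fun c hc => pvGetD_map_range _ _ _ (by omega))]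
    rw [show List.range (m+1+1) = List.range (m+1) ++ [m+1] from List.range_succ]
    rw [List.map_append]
    simp

lemma pvPA_getD (mat : List (List Int)) (m n r c : Nat) (hr : r ≤ m) (hc : c ≤ n) :
    ((pvBuildPA mat m n).getD r []).getD c 0 = pvPref mat r c := by
  rw [pvBuildPA_eq]
  have : ((List.range (m+1)).map (fun r => (List.range (n+1)).map (pvPref mat r))).getD r []
      = (List.range (n+1)).map (pvPref mat r) := by
    rw [List.getD_eq_getElem?_getD]
    simp [Nat.lt_succ_of_le hr]
  rw [this]
  exact pvGetD_map_range _ _ _ (by omega)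

lemma pvPref_shift (mat : List (List Int)) (r k C : Nat) :
    pvPref mat (r+k) C - pvPref mat r C
      = ∑ i ∈ Finset.range k, ∑ j ∈ Finset.range C, pvEnt mat (r+i) j := by
  induction k with
  | zero => simp
  | succ k ih =>
    rw [show r + (k+1) = (r+k) + 1 from rfl, Finset.sum_range_succ, ← ih]
    have : pvPref mat (r+k+1) C
        = pvPref mat (r+k) C + ∑ j ∈ Finset.range C, pvEnt mat (r+k) j := by
      simp [pvPref, Finset.sum_range_succ]
    rw [this]; ring

lemma pvRow_shift (mat : List (List Int)) (i c k : Nat) :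
    (∑ j ∈ Finset.range (c+k), pvEnt mat i j) - (∑ j ∈ Finset.range c, pvEnt mat i j)
      = ∑ j ∈ Finset.range k, pvEnt mat i (c+j) := by
  induction k with
  | zero => simp
  | succ k ih =>
    rw [show c + (k+1) = (c+k) + 1 from rfl, Finset.sum_range_succ, Finset.sum_range_succ, ← ih]
    ring

lemma pvSquareSumB_eq (mat : List (List Int)) (r c k : Nat) :
    pvSquareSumB mat r c k
      = ∑ i ∈ Finset.range k, ∑ j ∈ Finset.range k, pvEnt mat (r+i) (c+j) := by
  unfold pvSquareSumB
  have inner : ∀ (t : Int) (i : Nat),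
      (List.range k).foldl (fun t j => t + (mat.getD (r+i) []).getD (c+j) 0) t
        = t + ∑ j ∈ Finset.range k, pvEnt mat (r+i) (c+j) := by
    intro t i
    rw [PySem.List.foldl_add]
    rfl
  simp only [inner]
  rw [PySem.List.foldl_add]
  rw [zero_add]
  rfl

lemma pvSum_eq (mat : List (List Int)) (m n r c k : Nat)
    (hk : 1 ≤ k) (hr : r + k ≤ m) (hc : c + k ≤ n) :
    pvGetSumA (pvBuildPA mat m n) r c (r + k - 1) (c + k - 1) = pvSquareSumB mat r c k := by
  unfold pvGetSumA
  rw [show r + k - 1 + 1 = r + k from by omega, show c + k - 1 + 1 = c + k from by omega]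
  rw [pvPA_getD mat m n (r+k) (c+k) (by omega) (by omega),
      pvPA_getD mat m n r (c+k) (by omega) (by omega),
      pvPA_getD mat m n (r+k) c (by omega) (by omega),
      pvPA_getD mat m n r c (by omega) (by omega)]
  rw [pvSquareSumB_eq]
  calc pvPref mat (r+k) (c+k) - pvPref mat r (c+k) - pvPref mat (r+k) c + pvPref mat r c
      = (pvPref mat (r+k) (c+k) - pvPref mat r (c+k))
        - (pvPref mat (r+k) c - pvPref mat r c) := by ring
    _ = (∑ i ∈ Finset.range k, ∑ j ∈ Finset.range (c+k), pvEnt mat (r+i) j)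
        - (∑ i ∈ Finset.range k, ∑ j ∈ Finset.range c, pvEnt mat (r+i) j) := by
          rw [pvPref_shift, pvPref_shift]
    _ = ∑ i ∈ Finset.range k, ((∑ j ∈ Finset.range (c+k), pvEnt mat (r+i) j)
        - (∑ j ∈ Finset.range c, pvEnt mat (r+i) j)) := by
          rw [Finset.sum_sub_distrib]
    _ = ∑ i ∈ Finset.range k, ∑ j ∈ Finset.range k, pvEnt mat (r+i) (c+j) :=
          Finset.sum_congr rfl (fun i _ => pvRow_shift mat (r+i) c k)

lemma pvCheck_eq (mat : List (List Int)) (threshold : Int) (m n k : Nat) (hk : 1 ≤ k) :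
    pvCheckA (pvBuildPA mat m n) threshold m n k = pvOkB mat threshold m n k := by
  unfold pvCheckA pvOkB
  apply PySem.List.any_congr_mem
  intro r hr
  apply PySem.List.any_congr_mem
  intro c hc
  rw [List.mem_range] at hr hc
  rw [pvSum_eq mat m n r c k hk (by omega) (by omega)]

lemma pvBsearch_congr (f g : Nat → Bool) (h : ∀ k, 1 ≤ k → f k = g k) :
    ∀ low high ans, 1 ≤ low → pvBsearchA f low high ans = pvBsearchB g low high ans := by
  intro low high ans
  induction low, high, ans using pvBsearchA.induct f with
  | case1 low high ans hle mid htrue ih =>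
    intro hlow
    have hmid : mid = (low + high) / 2 := rfl
    have ht : f ((low + high) / 2) = true := hmid ▸ htrue
    rw [pvBsearchA, pvBsearchB]
    simp only [dif_pos hle]
    rw [← h ((low + high) / 2) (by omega), ht]
    simp only [if_true]
    rw [← hmid]
    exact ih (by omega)
  | case2 low high ans hle mid hfalse hm =>
    intro hlow
    have hmid : mid = (low + high) / 2 := rfl
    omega
  | case3 low high ans hle mid hfalse hm ih =>
    intro hlow
    have hmid : mid = (low + high) / 2 := rfl
    have hf : f ((low + high) / 2) = false := by rw [← hmid]; simpa using hfalse
    have hm' : ¬ ((low + high) / 2 = 0) := by omega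
    rw [pvBsearchA, pvBsearchB]
    simp only [dif_pos hle]
    rw [← h ((low + high) / 2) (by omega), hf]
    simp only [Bool.false_eq_true, if_false, dif_neg hm']
    rw [← hmid]
    exact ih hlow
  | case4 low high ans hgt =>
    intro _
    rw [pvBsearchA, pvBsearchB]
    simp [hgt]

-- ===== VERDICT (by name: the statement is the Claim_ definition above) =====
theorem maxSideLength_spec : Claim_equal_maxSideLength := by
  intro mat threshold _ _
  unfold Spec_maxSideLength
  show maxSideLength mat threshold = maxSideLength_alt mat threshold
  unfold maxSideLength maxSideLength_alt
  exact congrArg _ (pvBsearch_congr _ _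
    (fun k hk => pvCheck_eq mat threshold _ _ k hk) 1 _ 0 le_rfl)
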